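-- pv_equiv track=rewrite | github.com/ZainZh/curi_goes_hands_on | src/utilis/common.py | is_float_compatible
-- ===== SOURCE A (Python) =====
-- def is_float_compatible(string):
--     """Check if the string can be converted to a float.
--
--     Args:
--         string (str): Input string.
--
--     Returns:
--         bool: True if the string can be converted to a float, false otherwise.
--     """
--     string = string.lstrip("-")
--     s_dot = string.split(".")
--     if len(s_dot) > 2:
--         return False
--     s_e_plus = string.split("e+")
--     if len(s_e_plus) == 2:
--         return is_float_compatible("".join(s_e_plus))
--     s_e_minus = string.split("e-")
--     if len(s_e_minus) == 2:
--         return is_float_compatible("".join(s_e_minus))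
--     s_e = string.split("e")
--     if len(s_e) == 2:
--         return is_float_compatible("".join(s_e))
--
--     for si in s_dot:
--         if not si.isdigit():
--             return False
--     return True
-- ===== SOURCE B (Python) =====
-- def is_float_compatible(string):
--     """Iterative, table-driven rewrite: while loop over the string instead of
--     recursion; exponent separators tried from a tuple; all() for the digit check."""
--     while True:
--         string = string.lstrip("-")
--         parts = string.split(".")
--         if len(parts) > 2:
--             return False
--         for sep in ("e+", "e-", "e"):
--             pieces = string.split(sep)
--             if len(pieces) == 2:
--                 string = "".join(pieces)
--                 break
--         else:
--             return all(p.isdigit() for p in parts)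
-- ===== Notes on version B (the rewrite author's own statement) =====
-- stated objective: alternative
-- what changed: Recursive exponent-peeling becomes an explicit while loop; the three copied e+/e-/e if-blocks become one data-driven scan over a separator tuple, and the final per-piece digit loop becomes all().
import Mathlib
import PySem

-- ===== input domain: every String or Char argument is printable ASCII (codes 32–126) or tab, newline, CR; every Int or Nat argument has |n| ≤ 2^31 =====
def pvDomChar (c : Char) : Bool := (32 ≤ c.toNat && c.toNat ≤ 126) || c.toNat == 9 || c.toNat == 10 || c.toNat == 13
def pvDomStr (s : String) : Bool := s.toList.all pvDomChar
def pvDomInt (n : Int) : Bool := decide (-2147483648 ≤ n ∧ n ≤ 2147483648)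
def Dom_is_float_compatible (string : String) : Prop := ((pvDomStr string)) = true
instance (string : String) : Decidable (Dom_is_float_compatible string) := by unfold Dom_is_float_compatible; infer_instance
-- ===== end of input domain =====

-- B replaces A's recursive exponent-peeling by an explicit fuelled loop trying the
-- separators from a table and an all()-style digit check after the loop (alternative decomposition, same cost).


-- ===== PORT A =====
-- string.lstrip("-"): drops exactly the leading '-' characters (exact for this one-char set)
def pvLstripMinus (cs : List Char) : List Char := cs.dropWhile (· == '-')

-- 'for si in s_dot: if not si.isdigit(): return False' then 'return True'
def pvDigitLoopA : List (List Char) → Bool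
  | [] => true
  | si :: rest => if !(PySem.Chars.strIsdigit si) then false else pvDigitLoopA rest

-- the recursive body of A; fuel only makes the recursion total (enough fuel is supplied:
-- each recursive call is on a strictly shorter string)
def pvFloatA : Nat → List Char → Bool
  | 0, _ => false
  | fuel + 1, cs =>
    let s := pvLstripMinus cs
    let sDot := PySem.Chars.splitOn s ['.']
    if sDot.length > 2 then false
    else
      let sEPlus := PySem.Chars.splitOn s ['e', '+']
      if sEPlus.length = 2 then pvFloatA fuel (PySem.Chars.join [] sEPlus)
      else
        let sEMinus := PySem.Chars.splitOn s ['e', '-']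
        if sEMinus.length = 2 then pvFloatA fuel (PySem.Chars.join [] sEMinus)
        else
          let sE := PySem.Chars.splitOn s ['e']
          if sE.length = 2 then pvFloatA fuel (PySem.Chars.join [] sE)
          else pvDigitLoopA sDot

def is_float_compatible (string : String) : Bool :=
  pvFloatA (string.toList.length + 1) string.toList

-- ===== PORT B =====
-- 'for sep in ("e+","e-","e"): … break / else': first separator splitting into exactly
-- two pieces, yielding the joined pieces; none if no separator applies
def pvFirstSep (s : List Char) : List (List Char) → Option (List Char)
  | [] => none
  | sep :: rest =>
    let pieces := PySem.Chars.splitOn s sep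
    if pieces.length = 2 then some (PySem.Chars.join [] pieces) else pvFirstSep s rest

-- the while loop of B; fuel only makes the loop total (enough fuel is supplied:
-- each iteration shortens the string)
def pvFloatB : Nat → List Char → Bool
  | 0, _ => false
  | fuel + 1, cs =>
    let s := pvLstripMinus cs
    let parts := PySem.Chars.splitOn s ['.']
    if parts.length > 2 then false
    else
      match pvFirstSep s [['e', '+'], ['e', '-'], ['e']] with
      | some s' => pvFloatB fuel s'
      | none => parts.all PySem.Chars.strIsdigit

def is_float_compatible_alt (string : String) : Bool :=
  pvFloatB (string.toList.length + 1) string.toList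

-- ===== PRECONDITION & SPEC =====
def Spec_is_float_compatible (string : String) (out : Bool) : Prop := out = is_float_compatible_alt string
instance (string : String) (out : Bool) : Decidable (Spec_is_float_compatible string out) := by unfold Spec_is_float_compatible; infer_instance

-- ===== CLAIM (what is proved, stated in full; the proofs are below) =====
def Claim_equal_is_float_compatible : Prop := ∀ (string : String), Dom_is_float_compatible string → Spec_is_float_compatible string (is_float_compatible string)

-- ===== LEMMAS AND PROOFS =====
theorem pvDigitLoopA_eq_all (ps : List (List Char)) :
    pvDigitLoopA ps = ps.all PySem.Chars.strIsdigit := by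
  induction ps with
  | nil => rfl
  | cons si rest ih =>
    simp only [pvDigitLoopA, List.all_cons, ih]
    cases h : PySem.Chars.strIsdigit si <;> simp

theorem pvFloat_eq (fuel : Nat) : ∀ cs : List Char, pvFloatA fuel cs = pvFloatB fuel cs := by
  induction fuel with
  | zero => intro cs; rfl
  | succ f ih =>
    intro cs
    simp only [pvFloatA, pvFloatB, pvFirstSep, pvDigitLoopA_eq_all]
    split_ifs <;> simp_all

-- ===== VERDICT (by name: the statement is the Claim_ definition above) =====
theorem is_float_compatible_spec : Claim_equal_is_float_compatible := by
  intro string _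
  unfold Spec_is_float_compatible is_float_compatible is_float_compatible_alt
  exact pvFloat_eq _ _
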